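-- pv_equiv track=rewrite | github.com/fabianruiz3/pokerbots-2026 | Camello_cfr/abstraction.py | get_board_bucket
-- ===== SOURCE A (Python) =====
-- def get_board_bucket(board_cards):
--     """
--     Compute board bucket - matches C++ get_board_bucket.
--     Returns bucket 0-24 (25 buckets total).
--     """
--     if not board_cards:
--         return 0
--
--     cards = []
--     for c in board_cards:
--         if isinstance(c, int):
--             cards.append(c)
--         else:
--             cards.append(card_str_to_int(str(c)))
--
--     ranks = [c // 4 for c in cards]
--     suits = [c % 4 for c in cards]
--
--     # Rank counts
--     rc = [0] * 13
--     for r in ranks: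
--         rc[r] += 1
--     max_rank_count = max(rc)
--
--     # Suit counts
--     sc = [0] * 4
--     for s in suits:
--         sc[s] += 1
--     max_suit_count = max(sc)
--
--     # Straight potential
--     uniq = sorted(set(ranks))
--     straight_potential = 0
--     for i in range(len(uniq)):
--         for j in range(i + 1, len(uniq)):
--             if uniq[j] - uniq[i] <= 4:
--                 straight_potential = max(straight_potential, j - i + 1)
--
--     high_card = max(ranks)
--
--     # Simplified features
--     paired = 1 if max_rank_count >= 2 else 0
--     flush_draw = min(2, max_suit_count - 1)
--     straight_draw = min(2, max(0, straight_potential - 2))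
--     high = 1 if high_card >= 10 else 0  # T=8, J=9, Q=10, K=11, A=12
--
--     # Combine into ~25 buckets
--     bucket = paired * 12 + flush_draw * 4 + straight_draw * 2 + high
--     return min(24, bucket)
--
-- def card_str_to_int(card_str):
--     """
--     Convert card string like 'Ah' to int format (rank*4 + suit).
--
--     Rank: 2=0, 3=1, ..., T=8, J=9, Q=10, K=11, A=12
--     Suit: c=0, d=1, h=2, s=3
--     """
--     rank_map = {'2': 0, '3': 1, '4': 2, '5': 3, '6': 4, '7': 5, '8': 6, '9': 7,
--                 'T': 8, 'J': 9, 'Q': 10, 'K': 11, 'A': 12}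
--     suit_map = {'c': 0, 'd': 1, 'h': 2, 's': 3}
--
--     r = rank_map.get(card_str[0].upper(), 0)
--     s = suit_map.get(card_str[1].lower(), 0)
--     return r * 4 + s
-- ===== SOURCE B (Python) =====
-- def get_board_bucket(board_cards):
--     """
--     Compute board bucket 0-24 via bitset arithmetic.
--
--     Instead of histograms and a sorted unique-rank list, one pass builds a
--     13-bit rank-presence bitmask (a duplicate rank is detected when its bit is
--     already set) and three 4-bit suit masks s1/s2/s3 = suits seen at least
--     once/twice/three times; straight potential is the max popcount of the
--     5-wide bit windows of the rank mask, high card is mask >> 10.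
--     """
--     if not board_cards:
--         return 0
--
--     RANKS = "23456789TJQKA"
--     SUITS = "cdhs"
--     mask = 0
--     paired = 0
--     s1 = s2 = s3 = 0
--     for c in board_cards:
--         if isinstance(c, int):
--             card = c
--         else:
--             cs = str(c)
--             card = 4 * max(0, RANKS.find(cs[0].upper())) + max(0, SUITS.find(cs[1].lower()))
--         rbit = 1 << (card // 4)
--         sbit = 1 << (card % 4)
--         if mask & rbit:
--             paired = 1
--         s3 |= s2 & sbit
--         s2 |= s1 & sbit
--         s1 |= sbit
--         mask |= rbit
--
--     sp = 0
--     m = mask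
--     while m:
--         sp = max(sp, bin(m & 31).count("1"))
--         m >>= 1
--
--     flush_draw = 2 if s3 else (1 if s2 else 0)
--     straight_draw = min(2, max(0, sp - 2))
--     high = 1 if mask >> 10 else 0
--     return min(24, paired * 12 + flush_draw * 4 + straight_draw * 2 + high)
-- ===== Notes on version B (the rewrite author's own statement) =====
-- stated objective: alternative
-- what changed: B replaces A's histograms, sorted unique-rank list and O(k^2) pair scan by bitset arithmetic: one pass builds a 13-bit rank-presence mask (duplicates detected by an already-set bit) and three suit masks for seen-once/twice/thrice, straight potential is the max popcount over 5-wide bit windows of the rank mask, and the high card test is a right shift.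
import Mathlib
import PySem

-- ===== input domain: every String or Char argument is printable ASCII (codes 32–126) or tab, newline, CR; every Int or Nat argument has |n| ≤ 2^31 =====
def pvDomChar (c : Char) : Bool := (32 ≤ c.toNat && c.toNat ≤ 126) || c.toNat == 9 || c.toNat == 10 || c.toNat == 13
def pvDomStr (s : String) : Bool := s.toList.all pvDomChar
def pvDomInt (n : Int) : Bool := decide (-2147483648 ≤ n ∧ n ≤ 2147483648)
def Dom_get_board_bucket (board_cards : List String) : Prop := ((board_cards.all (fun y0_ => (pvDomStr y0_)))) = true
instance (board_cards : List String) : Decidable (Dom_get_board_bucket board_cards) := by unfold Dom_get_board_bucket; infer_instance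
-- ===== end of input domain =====

-- B replaces A's histograms, sorted unique-rank list and O(k^2) pair scan by bitset arithmetic:
-- one pass builds a rank-presence bitmask and three once/twice/thrice suit masks, straight
-- potential is the max popcount over 5-wide bit windows of the rank mask (objective: alternative).

-- ===== PORT A =====
-- literal rank_map / suit_map dicts of card_str_to_int
def pvRankMapA : PySem.Dict Char Int :=
  PySem.Dict.mk [('2',0),('3',1),('4',2),('5',3),('6',4),('7',5),('8',6),('9',7),
                 ('T',8),('J',9),('Q',10),('K',11),('A',12)]
def pvSuitMapA : PySem.Dict Char Int :=
  PySem.Dict.mk [('c',0),('d',1),('h',2),('s',3)]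

-- card_str[0] / card_str[1] raise IndexError on strings shorter than 2: Pre_ excludes those
-- inputs, so the `.getD ' '` default is never consulted on admitted inputs.
def card_str_to_int (card_str : String) : Int :=
  let r := pvRankMapA.getD (PySem.Chars.upperChar ((PySem.Str.pyGet? card_str 0).getD ' ')) 0
  let s := pvSuitMapA.getD (PySem.Chars.lowerChar ((PySem.Str.pyGet? card_str 1).getD ' ')) 0
  r * 4 + s

-- the `isinstance(c, int)` branch of the Python loop is unreachable for list[str] arguments
-- and is dropped; `str(c)` on a str is the identity.  rc[r] += 1 / sc[s] += 1 use pySetD /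
-- pyGetD (indices are in range by construction of card_str_to_int).  max(rc) etc. is max?
-- (nonempty lists here, so the .getD 0 default is never consulted).
def get_board_bucket (board_cards : List String) : Int :=
  if board_cards = [] then 0
  else
    let cards : List Int := board_cards.foldl (fun acc c => acc ++ [card_str_to_int c]) []
    let ranks := cards.map (fun c => PySem.Int.floordiv c 4)
    let suits := cards.map (fun c => PySem.Int.mod c 4)
    let rc := ranks.foldl (fun a r => PySem.List.pySetD a r (PySem.List.pyGetD a r 0 + 1))
      (List.replicate 13 (0:Int))
    let max_rank_count := (PySem.List.max? rc (fun x => x)).getD 0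
    let sc := suits.foldl (fun a s => PySem.List.pySetD a s (PySem.List.pyGetD a s 0 + 1))
      (List.replicate 4 (0:Int))
    let max_suit_count := (PySem.List.max? sc (fun x => x)).getD 0
    let uniq : List Int := PySem.List.sorted (PySem.Set.ofList ranks) (fun x => x)
    let sp := (PySem.List.pyRange 0 (PySem.List.len uniq) 1).foldl (fun sp i =>
        (PySem.List.pyRange (i+1) (PySem.List.len uniq) 1).foldl (fun sp j =>
          if PySem.List.pyGetD uniq j 0 - PySem.List.pyGetD uniq i 0 ≤ 4
          then max sp (j - i + 1) else sp) sp) 0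
    let high_card := (PySem.List.max? ranks (fun x => x)).getD 0
    let paired : Int := if 2 ≤ max_rank_count then 1 else 0
    let flush_draw := min 2 (max_suit_count - 1)
    let straight_draw := min 2 (max 0 (sp - 2))
    let high : Int := if 10 ≤ high_card then 1 else 0
    min 24 (paired * 12 + flush_draw * 4 + straight_draw * 2 + high)

-- ===== PORT B =====
def pvRanksB : List Char := ['2','3','4','5','6','7','8','9','T','J','Q','K','A']
def pvSuitsB : List Char := ['c','d','h','s']

-- the inline parse of Source B's loop body (cs[0]/cs[1] raise on short strings — outside Pre_,
-- the `.getD ' '` default is never consulted on admitted inputs)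
def pvParseCardB (c : String) : Int :=
  let cs := c.toList
  4 * max 0 (PySem.Chars.find pvRanksB [PySem.Chars.upperChar ((PySem.List.pyGet? cs 0).getD ' ')])
    + max 0 (PySem.Chars.find pvSuitsB [PySem.Chars.lowerChar ((PySem.List.pyGet? cs 1).getD ' ')])

-- Source B's loop body.  The five accumulators mask/paired/s1/s2/s3 are Python ints that stay
-- nonnegative (ors of single bits), so the bitmasks are carried as Nat — exact; `paired`
-- is Int (it enters the final arithmetic).  Shift amounts card//4 and card%4 are ≥ 0 by
-- construction of the parse, so `.toNat` is exact.  State order: (mask, paired, s1, s2, s3);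
-- s3 is updated from the old s2 and s2 from the old s1, exactly as the Python lines do.
def pvStepB (st : Nat × Int × Nat × Nat × Nat) (c : String) : Nat × Int × Nat × Nat × Nat :=
  let card := pvParseCardB c
  let rbit : Nat := 1 <<< (PySem.Int.floordiv card 4).toNat
  let sbit : Nat := 1 <<< (PySem.Int.mod card 4).toNat
  (st.1 ||| rbit,
   if st.1 &&& rbit ≠ 0 then 1 else st.2.1,
   st.2.2.1 ||| sbit,
   st.2.2.2.1 ||| (st.2.2.1 &&& sbit),
   st.2.2.2.2 ||| (st.2.2.2.1 &&& sbit))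

-- Source B's `while m: sp = max(sp, bin(m & 31).count("1")); m >>= 1`; bin(w).count("1") for a
-- nonnegative w is the population count, ported as PySem.Int.bitCount.
def pvSpLoopB (m : Nat) (sp : Int) : Int :=
  if m = 0 then sp
  else pvSpLoopB (m >>> 1) (max sp ((PySem.Int.bitCount ((m &&& 31 : Nat) : Int) : Nat) : Int))
termination_by m
decreasing_by
  have h2 : m >>> 1 = m / 2 := Nat.shiftRight_one m
  omega

def get_board_bucket_alt (board_cards : List String) : Int :=
  if board_cards = [] then 0
  else
    let st := board_cards.foldl pvStepB (0, 0, 0, 0, 0)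
    let sp := pvSpLoopB st.1 0
    let flush_draw : Int := if st.2.2.2.2 ≠ 0 then 2 else if st.2.2.2.1 ≠ 0 then 1 else 0
    let straight_draw := min 2 (max 0 (sp - 2))
    let high : Int := if st.1 >>> 10 ≠ 0 then 1 else 0
    min 24 (st.2.1 * 12 + flush_draw * 4 + straight_draw * 2 + high)

-- ===== PRECONDITION & SPEC =====
-- Pre_ excludes exactly the inputs where A raises: a card string shorter than 2 characters
-- makes card_str[0] / card_str[1] raise IndexError.
def Pre_get_board_bucket (board_cards : List String) : Prop :=
  ∀ c ∈ board_cards, 2 ≤ c.length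
instance (board_cards : List String) : Decidable (Pre_get_board_bucket board_cards) := by
  unfold Pre_get_board_bucket; infer_instance

def pvWitness_get_board_bucket : List String := ["Ah", "Kd", "2c"]

def Spec_get_board_bucket (board_cards : List String) (out : Int) : Prop :=
  out = get_board_bucket_alt board_cards
instance (board_cards : List String) (out : Int) : Decidable (Spec_get_board_bucket board_cards out) := by
  unfold Spec_get_board_bucket; infer_instance

-- ===== CLAIM (what is proved, stated in full; the proofs are below) =====
def Claim_equal_get_board_bucket : Prop := ∀ (board_cards : List String), Dom_get_board_bucket board_cards → Pre_get_board_bucket board_cards → Spec_get_board_bucket board_cards (get_board_bucket board_cards)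

-- ===== LEMMAS AND PROOFS =====

-- parsing: A's dict lookup equals B's string-index lookup, per character
theorem pvRankEq (ch : Char) :
    pvRankMapA.getD ch 0 = max 0 (PySem.Chars.find pvRanksB [ch]) := by
  by_cases h0 : ch = '2'
  · subst h0; decide
  by_cases h1 : ch = '3'
  · subst h1; decide
  by_cases h2 : ch = '4'
  · subst h2; decide
  by_cases h3 : ch = '5'
  · subst h3; decide
  by_cases h4 : ch = '6'
  · subst h4; decide
  by_cases h5 : ch = '7'
  · subst h5; decide
  by_cases h6 : ch = '8'
  · subst h6; decide
  by_cases h7 : ch = '9'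
  · subst h7; decide
  by_cases h8 : ch = 'T'
  · subst h8; decide
  by_cases h9 : ch = 'J'
  · subst h9; decide
  by_cases h10 : ch = 'Q'
  · subst h10; decide
  by_cases h11 : ch = 'K'
  · subst h11; decide
  by_cases h12 : ch = 'A'
  · subst h12; decide
  have hfind : PySem.Chars.find pvRanksB [ch] = -1 := by
    rw [PySem.Chars.find_eq_neg_one_iff]
    intro hinf
    have hmem : ch ∈ pvRanksB := by simpa using hinf.subset (List.mem_singleton_self ch)
    simp only [pvRanksB, List.mem_cons, List.not_mem_nil, or_false] at hmem
    rcases hmem with h | h | h | h | h | h | h | h | h | h | h | h | h <;> simp_all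
  rw [hfind]
  simp [pvRankMapA, PySem.Dict.getD, PySem.Dict.get?, List.find?,
    show ('2' == ch) = false from by simp [Ne.symm h0],
    show ('3' == ch) = false from by simp [Ne.symm h1],
    show ('4' == ch) = false from by simp [Ne.symm h2],
    show ('5' == ch) = false from by simp [Ne.symm h3],
    show ('6' == ch) = false from by simp [Ne.symm h4],
    show ('7' == ch) = false from by simp [Ne.symm h5],
    show ('8' == ch) = false from by simp [Ne.symm h6],
    show ('9' == ch) = false from by simp [Ne.symm h7],
    show ('T' == ch) = false from by simp [Ne.symm h8],
    show ('J' == ch) = false from by simp [Ne.symm h9],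
    show ('Q' == ch) = false from by simp [Ne.symm h10],
    show ('K' == ch) = false from by simp [Ne.symm h11],
    show ('A' == ch) = false from by simp [Ne.symm h12]]

theorem pvSuitEq (ch : Char) :
    pvSuitMapA.getD ch 0 = max 0 (PySem.Chars.find pvSuitsB [ch]) := by
  by_cases h0 : ch = 'c'
  · subst h0; decide
  by_cases h1 : ch = 'd'
  · subst h1; decide
  by_cases h2 : ch = 'h'
  · subst h2; decide
  by_cases h3 : ch = 's'
  · subst h3; decide
  have hfind : PySem.Chars.find pvSuitsB [ch] = -1 := by
    rw [PySem.Chars.find_eq_neg_one_iff]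
    intro hinf
    have hmem : ch ∈ pvSuitsB := by simpa using hinf.subset (List.mem_singleton_self ch)
    simp only [pvSuitsB, List.mem_cons, List.not_mem_nil, or_false] at hmem
    rcases hmem with h | h | h | h <;> simp_all
  rw [hfind]
  simp [pvSuitMapA, PySem.Dict.getD, PySem.Dict.get?, List.find?,
    show ('c' == ch) = false from by simp [Ne.symm h0],
    show ('d' == ch) = false from by simp [Ne.symm h1],
    show ('h' == ch) = false from by simp [Ne.symm h2],
    show ('s' == ch) = false from by simp [Ne.symm h3]]

theorem pvFindSingletonLt (l : List Char) (ch : Char) :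
    PySem.Chars.find l [ch] < (l.length : Int) ∨ PySem.Chars.find l [ch] = -1 := by
  by_cases h : 0 ≤ PySem.Chars.find l [ch]
  · left
    have hpre := (PySem.Chars.find_spec h).1
    have hlen := hpre.length_le
    simp [List.length_drop] at hlen
    have := Int.toNat_of_nonneg h
    omega
  · right
    have := PySem.Chars.neg_one_le_find l [ch]
    omega

def pvRk (c : String) : Int :=
  max 0 (PySem.Chars.find pvRanksB [PySem.Chars.upperChar ((PySem.List.pyGet? c.toList 0).getD ' ')])
def pvSt (c : String) : Int :=
  max 0 (PySem.Chars.find pvSuitsB [PySem.Chars.lowerChar ((PySem.List.pyGet? c.toList 1).getD ' ')])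
def pvRkN (c : String) : Nat := (pvRk c).toNat
def pvStN (c : String) : Nat := (pvSt c).toNat

theorem pvRkBounds (c : String) : 0 ≤ pvRk c ∧ pvRk c ≤ 12 := by
  unfold pvRk
  rcases pvFindSingletonLt pvRanksB (PySem.Chars.upperChar ((PySem.List.pyGet? c.toList 0).getD ' ')) with h | h
  · have hl : (pvRanksB.length : Int) = 13 := by decide
    omega
  · omega

theorem pvStBounds (c : String) : 0 ≤ pvSt c ∧ pvSt c ≤ 3 := by
  unfold pvSt
  rcases pvFindSingletonLt pvSuitsB (PySem.Chars.lowerChar ((PySem.List.pyGet? c.toList 1).getD ' ')) with h | h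
  · have hl : (pvSuitsB.length : Int) = 4 := by decide
    omega
  · omega

theorem pvParseB_eq (c : String) : pvParseCardB c = 4 * pvRk c + pvSt c := rfl

theorem pvParseEq (c : String) : card_str_to_int c = pvParseCardB c := by
  unfold card_str_to_int
  rw [pvParseB_eq]
  have h0 : PySem.Str.pyGet? c 0 = PySem.List.pyGet? c.toList 0 := by
    simp [PySem.Str.pyGet?]
  have h1 : PySem.Str.pyGet? c 1 = PySem.List.pyGet? c.toList 1 := by
    simp [PySem.Str.pyGet?]
  rw [h0, h1, pvRankEq, pvSuitEq]
  unfold pvRk pvSt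
  ring

theorem pvFdivParse (c : String) : PySem.Int.floordiv (pvParseCardB c) 4 = pvRk c := by
  rw [pvParseB_eq, PySem.Int.floordiv_eq_iff_of_pos (by omega)]
  constructor <;> nlinarith [pvRkBounds c, pvStBounds c]

theorem pvModParse (c : String) : PySem.Int.mod (pvParseCardB c) 4 = pvSt c := by
  have h := PySem.Int.floordiv_mul_add_mod (pvParseCardB c) 4
  rw [pvFdivParse] at h
  rw [pvParseB_eq] at h ⊢
  omega

theorem pvRkCast (c : String) : pvRk c = ((pvRkN c : Nat) : Int) := by
  unfold pvRkN; exact (Int.toNat_of_nonneg (pvRkBounds c).1).symm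

theorem pvStCast (c : String) : pvSt c = ((pvStN c : Nat) : Int) := by
  unfold pvStN; exact (Int.toNat_of_nonneg (pvStBounds c).1).symm

theorem pvRkNlt (c : String) : pvRkN c < 13 := by
  have := pvRkBounds c; unfold pvRkN; omega

theorem pvStNlt (c : String) : pvStN c < 4 := by
  have := pvStBounds c; unfold pvStN; omega

-- A's count-table fold: entry k of the table is the count of k in the list
theorem pvCountFold (l : List Int) : ∀ (a : List Int),
    (∀ x ∈ l, 0 ≤ x ∧ x < (a.length : Int)) →
    (l.foldl (fun a r => PySem.List.pySetD a r (PySem.List.pyGetD a r 0 + 1)) a).length = a.length ∧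
    ∀ k : Nat, k < a.length →
      (l.foldl (fun a r => PySem.List.pySetD a r (PySem.List.pyGetD a r 0 + 1)) a).getD k 0
        = a.getD k 0 + l.count (k : Int) := by
  induction l with
  | nil => intro a _; simp
  | cons x l ih =>
    intro a hb
    obtain ⟨hx0, hxlt⟩ := hb x (by simp)
    have hxlen : x.toNat < a.length := by omega
    simp only [List.foldl_cons]
    have ha' : (PySem.List.pySetD a x (PySem.List.pyGetD a x 0 + 1)).length = a.length :=
      PySem.List.length_pySetD a x _
    obtain ⟨ihlen, ihget⟩ := ih (PySem.List.pySetD a x (PySem.List.pyGetD a x 0 + 1))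
      (by rw [ha']; exact fun y hy => hb y (by simp [hy]))
    refine ⟨by rw [ihlen, ha'], ?_⟩
    intro k hk
    rw [ihget k (by rw [ha']; exact hk)]
    have hget : PySem.List.pyGetD a x 0 = a.getD x.toNat 0 := by
      rw [PySem.List.pyGetD_eq_getElem a 0 hx0 (by simpa using hxlt), List.getD_eq_getElem a 0 hxlen]
    rw [PySem.List.pySetD_of_nonneg a _ hx0]
    rw [List.count_cons]
    rw [List.getD_eq_getElem _ 0 (by simpa using hk), List.getD_eq_getElem a 0 hk,
        List.getElem_set]
    have hg2 : PySem.List.pyGetD a x 0 = a[x.toNat] := by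
      rw [hget, List.getD_eq_getElem a 0 hxlen]
    by_cases hkx : x.toNat = k
    · have hbeq : (x == (k : Int)) = true := by simp; omega
      subst hkx
      rw [if_pos rfl, hbeq, hg2]
      simp only [if_true]
      push_cast
      ring
    · have hbeq : (x == (k : Int)) = false := by simp; omega
      rw [if_neg hkx, hbeq]
      simp

-- ---- B's fused bit-mask fold: characterization of the five accumulators ----

theorem pvAndTwoPowNe (m i : Nat) : (m &&& 2 ^ i ≠ 0) ↔ m.testBit i = true := by
  rw [Nat.and_two_pow]
  cases h : m.testBit i <;> simp [h]

theorem pvFoldBChar (b : List String) :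
    (∀ k, (b.foldl pvStepB (0,0,0,0,0)).1.testBit k
        = decide (1 ≤ (b.map pvRkN).count k))
  ∧ ((b.foldl pvStepB (0,0,0,0,0)).2.1 = if (b.map pvRkN).Nodup then 0 else 1)
  ∧ (∀ k, (b.foldl pvStepB (0,0,0,0,0)).2.2.1.testBit k
        = decide (1 ≤ (b.map pvStN).count k))
  ∧ (∀ k, (b.foldl pvStepB (0,0,0,0,0)).2.2.2.1.testBit k
        = decide (2 ≤ (b.map pvStN).count k))
  ∧ (∀ k, (b.foldl pvStepB (0,0,0,0,0)).2.2.2.2.testBit k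
        = decide (3 ≤ (b.map pvStN).count k)) := by
  induction b using List.reverseRecOn with
  | nil => refine ⟨fun k => by simp, by simp, fun k => by simp, fun k => by simp, fun k => by simp⟩
  | append_singleton l c ih =>
    obtain ⟨ihm, ihp, ih1, ih2, ih3⟩ := ih
    rw [List.foldl_append] at *
    set st := l.foldl pvStepB (0,0,0,0,0) with hst
    have hrbit : (1 : Nat) <<< (PySem.Int.floordiv (pvParseCardB c) 4).toNat = 2 ^ pvRkN c := by
      rw [pvFdivParse]; exact Nat.one_shiftLeft _
    have hsbit : (1 : Nat) <<< (PySem.Int.mod (pvParseCardB c) 4).toNat = 2 ^ pvStN c := by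
      rw [pvModParse]; exact Nat.one_shiftLeft _
    have hstep : List.foldl pvStepB st [c]
        = (st.1 ||| 2 ^ pvRkN c,
           if st.1 &&& 2 ^ pvRkN c ≠ 0 then 1 else st.2.1,
           st.2.2.1 ||| 2 ^ pvStN c,
           st.2.2.2.1 ||| (st.2.2.1 &&& 2 ^ pvStN c),
           st.2.2.2.2 ||| (st.2.2.2.1 &&& 2 ^ pvStN c)) := by
      simp only [List.foldl_cons, List.foldl_nil, pvStepB, hrbit, hsbit]
    rw [hstep]
    have hcR : ∀ k, ((l.map pvRkN ++ [pvRkN c]).count k)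
        = (l.map pvRkN).count k + (if pvRkN c = k then 1 else 0) := by
      intro k
      rw [List.count_append]
      by_cases h : pvRkN c = k <;> simp [List.count_singleton, h, eq_comm]
    have hcS : ∀ k, ((l.map pvStN ++ [pvStN c]).count k)
        = (l.map pvStN).count k + (if pvStN c = k then 1 else 0) := by
      intro k
      rw [List.count_append]
      by_cases h : pvStN c = k <;> simp [List.count_singleton, h, eq_comm]
    refine ⟨?_, ?_, ?_, ?_, ?_⟩
    · intro k
      rw [List.map_append, List.map_cons, List.map_nil, hcR k, Nat.testBit_or, ihm,
          Nat.testBit_two_pow]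
      by_cases h : pvRkN c = k <;> by_cases h1 : 1 ≤ (l.map pvRkN).count k <;>
        simp [h, h1] <;> omega
    · rw [List.map_append, List.map_cons, List.map_nil]
      have hbit : (st.1 &&& 2 ^ pvRkN c ≠ 0) ↔ (1 ≤ (l.map pvRkN).count (pvRkN c)) := by
        rw [pvAndTwoPowNe, ihm]; simp
      have hnd : (l.map pvRkN ++ [pvRkN c]).Nodup
          ↔ (l.map pvRkN).Nodup ∧ pvRkN c ∉ l.map pvRkN := by
        simp [List.nodup_append]
      by_cases hdup : 1 ≤ (l.map pvRkN).count (pvRkN c)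
      · rw [if_pos (hbit.mpr hdup), if_neg]
        rw [hnd]
        rintro ⟨-, hnm⟩
        exact hnm (List.count_pos_iff.mp (by omega))
      · rw [if_neg (fun h => hdup (hbit.mp h)), ihp]
        have hnm : pvRkN c ∉ l.map pvRkN := by
          intro h
          exact hdup (List.count_pos_iff.mpr h)
        by_cases hl : (l.map pvRkN).Nodup
        · rw [if_pos hl, if_pos (hnd.mpr ⟨hl, hnm⟩)]
        · rw [if_neg hl, if_neg (fun h => hl (hnd.mp h).1)]
    · intro k
      rw [List.map_append, List.map_cons, List.map_nil, hcS k, Nat.testBit_or, ih1,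
          Nat.testBit_two_pow]
      by_cases h : pvStN c = k <;> by_cases h1 : 1 ≤ (l.map pvStN).count k <;>
        simp [h, h1] <;> omega
    · intro k
      rw [List.map_append, List.map_cons, List.map_nil, hcS k, Nat.testBit_or,
          Nat.testBit_and, ih2, ih1, Nat.testBit_two_pow]
      by_cases h : pvStN c = k <;> by_cases h1 : 1 ≤ (l.map pvStN).count k <;>
        by_cases h2 : 2 ≤ (l.map pvStN).count k <;> simp [h, h1, h2] <;> omega
    · intro k
      rw [List.map_append, List.map_cons, List.map_nil, hcS k, Nat.testBit_or,
          Nat.testBit_and, ih3, ih2, Nat.testBit_two_pow]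
      by_cases h : pvStN c = k <;> by_cases h2 : 2 ≤ (l.map pvStN).count k <;>
        by_cases h3 : 3 ≤ (l.map pvStN).count k <;> simp [h, h2, h3] <;> omega

theorem pvNeZeroBit (n : Nat) (h : n ≠ 0) : ∃ i, n.testBit i = true := by
  by_contra hc
  push_neg at hc
  exact h (Nat.eq_of_testBit_eq (fun i => by simp [Bool.eq_false_iff.mpr (hc i)]))

theorem pvShiftNeZero (m k : Nat) : (m >>> k ≠ 0) ↔ ∃ i, k ≤ i ∧ m.testBit i = true := by
  constructor
  · intro h
    obtain ⟨j, hj⟩ := pvNeZeroBit _ h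
    rw [Nat.testBit_shiftRight] at hj
    exact ⟨k + j, by omega, hj⟩
  · rintro ⟨i, hki, hbit⟩
    intro h0
    have : (m >>> k).testBit (i - k) = true := by
      rw [Nat.testBit_shiftRight]
      rwa [show k + (i - k) = i by omega]
    rw [h0] at this
    simp at this

theorem pvMaskLt (m : Nat) (h : ∀ k, m.testBit k = true → k < 13) : m < 2 ^ 13 := by
  by_contra hc
  push_neg at hc
  have hne : m >>> 13 ≠ 0 := by
    rw [Nat.shiftRight_eq_div_pow]
    have : 1 ≤ m / 2 ^ 13 := (Nat.one_le_div_iff (by norm_num)).mpr hc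
    omega
  obtain ⟨i, hi, hbit⟩ := (pvShiftNeZero m 13).mp hne
  have := h i hbit
  omega

-- ---- straight-potential machinery ----

-- A's inner-pair loop, summed from a fixed anchor (reused shape from the pair-scan reduction)
def pvFoldIdx (A : Int) : List Int → Int → Int → Int
  | [], _, sp => sp
  | x :: s, v, sp => pvFoldIdx A s (v + 1) (if x - A ≤ 4 then max sp v else sp)

theorem pvSuf (A : Int) (s : List Int) : ∀ (v sp : Int), s.Pairwise (· ≤ ·) → 2 ≤ v →
    pvFoldIdx A s v sp =
      if 0 < s.countP (fun x => decide (x - A ≤ 4))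
      then max sp (v + (s.countP (fun x => decide (x - A ≤ 4)) : Int) - 1) else sp := by
  induction s with
  | nil => intro v sp _ _; simp [pvFoldIdx]
  | cons x s ih =>
    intro v sp hp hv
    rw [List.pairwise_cons] at hp
    obtain ⟨hx, hps⟩ := hp
    rw [List.countP_cons]
    by_cases hA : x - A ≤ 4
    · have hd : (decide (x - A ≤ 4)) = true := by simp [hA]
      simp only [pvFoldIdx, if_pos hA, hd, if_true]
      rw [ih (v + 1) (max sp v) hps (by omega)]
      by_cases ht : 0 < s.countP (fun x => decide (x - A ≤ 4))
      · rw [if_pos ht, if_pos (by omega)]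
        push_cast
        omega
      · have h0 : s.countP (fun x => decide (x - A ≤ 4)) = 0 := by omega
        rw [if_neg ht, h0, if_pos (by omega)]
        push_cast
        omega
    · have hzero : s.countP (fun x => decide (x - A ≤ 4)) = 0 := by
        rw [List.countP_eq_zero]
        intro y hy
        simp only [decide_eq_true_eq]
        have := hx y hy
        omega
      have hd : (decide (x - A ≤ 4)) = false := by simp [hA]
      simp only [pvFoldIdx, if_neg hA, hd, Bool.false_eq_true, if_false]
      rw [ih (v + 1) sp hps (by omega), hzero]
      simp

theorem pvBridge (u : List Int) (Av i : Int) : ∀ (jn : Nat) (j sp : Int), 0 ≤ j →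
    j.toNat + jn = u.length →
    (PySem.List.pyRange j (PySem.List.len u) 1).foldl
        (fun sp' jj => if PySem.List.pyGetD u jj 0 - Av ≤ 4 then max sp' (jj - i + 1) else sp') sp
      = pvFoldIdx Av (u.drop j.toNat) (j - i + 1) sp := by
  intro jn
  induction jn with
  | zero =>
    intro j sp hj hlen
    have hge : (u.length : Int) ≤ j := by omega
    rw [PySem.List.len_eq, PySem.List.pyRange_one_eq_nil hge,
        List.drop_eq_nil_of_le (by omega)]
    rfl
  | succ jn ih =>
    intro j sp hj hlen
    have hlt : j < (u.length : Int) := by omega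
    have hltn : j.toNat < u.length := by omega
    rw [PySem.List.len_eq, PySem.List.pyRange_one_cons hlt]
    rw [List.foldl_cons]
    rw [List.drop_eq_getElem_cons hltn]
    simp only [pvFoldIdx]
    rw [PySem.List.pyGetD_eq_getElem u 0 hj hlt]
    have h1 : (j + 1).toNat = j.toNat + 1 := by omega
    have := ih (j + 1) (if u[j.toNat] - Av ≤ 4 then max sp (j - i + 1) else sp) (by omega) (by omega)
    rw [PySem.List.len_eq] at this
    rw [this, h1]
    congr 1
    omega

def pvCnt (u : List Int) (r : Int) : Int :=
  ((u.map (fun x => if r ≤ x ∧ x ≤ r + 4 then (1:Int) else 0)).sum)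

theorem pvCntEq (u : List Int) (r : Int) :
    pvCnt u r = (u.countP (fun x => decide (r ≤ x ∧ x ≤ r + 4)) : Int) := by
  unfold pvCnt
  induction u with
  | nil => simp
  | cons x u ih =>
    rw [List.map_cons, List.sum_cons, List.countP_cons, ih]
    by_cases h : r ≤ x ∧ x ≤ r + 4
    · simp [h]
      omega
    · simp [h]

theorem pvInner (u : List Int) (hs : u.Pairwise (· < ·)) (i : Int) (h0 : 0 ≤ i)
    (hi : i.toNat < u.length) (sp : Int) :
    (PySem.List.pyRange (i+1) (PySem.List.len u) 1).foldl
        (fun sp' jj => if PySem.List.pyGetD u jj 0 - PySem.List.pyGetD u i 0 ≤ 4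
                       then max sp' (jj - i + 1) else sp') sp
      = if 2 ≤ pvCnt u (PySem.List.pyGetD u i 0)
        then max sp (pvCnt u (PySem.List.pyGetD u i 0)) else sp := by
  have hgetI : PySem.List.pyGetD u i 0 = u[i.toNat] :=
    PySem.List.pyGetD_eq_getElem u 0 h0 (by omega)
  obtain ⟨a, ha⟩ : ∃ a, u[i.toNat] = a := ⟨_, rfl⟩
  rw [hgetI, ha]
  have hb := pvBridge u a i (u.length - (i.toNat + 1)) (i+1) sp (by omega) (by omega)
  rw [hb]
  have ht : (i+1).toNat = i.toNat + 1 := by omega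
  rw [ht]
  have harith : (i + 1) - i + 1 = 2 := by ring
  rw [harith]
  rw [pvSuf a (u.drop (i.toNat+1)) 2 sp ((hs.imp (fun h => le_of_lt h)).drop) (le_refl 2)]
  have hpg := List.pairwise_iff_getElem.mp hs
  have hdlen : (u.drop (i.toNat+1)).length = u.length - (i.toNat+1) := List.length_drop
  have fact2 : ∀ y ∈ u.drop (i.toNat+1), a < y := by
    intro y hy
    obtain ⟨k, hk, hky⟩ := List.getElem_of_mem hy
    have hk' : i.toNat + 1 + k < u.length := by omega
    rw [List.getElem_drop] at hky
    subst hky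
    rw [← ha]
    exact hpg i.toNat (i.toNat+1+k) hi hk' (by omega)
  have hcnt : pvCnt u a = ((u.drop (i.toNat+1)).countP (fun x => decide (x - a ≤ 4)) : Int) + 1 := by
    rw [pvCntEq]
    conv_lhs => rw [← List.take_append_drop (i.toNat+1) u]
    rw [List.countP_append]
    have htake : (u.take (i.toNat+1)).countP (fun x => decide (a ≤ x ∧ x ≤ a + 4)) = 1 := by
      rw [List.take_add_one, List.countP_append]
      have h1 : (u.take i.toNat).countP (fun x => decide (a ≤ x ∧ x ≤ a + 4)) = 0 := by
        rw [List.countP_eq_zero]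
        intro y hy
        obtain ⟨k, hk, hky⟩ := List.getElem_of_mem hy
        rw [List.getElem_take] at hky
        subst hky
        have hklt : k < i.toNat := lt_of_lt_of_le hk (List.length_take_le _ _)
        have := hpg k i.toNat (by omega) hi hklt
        rw [ha] at this
        simp only [decide_eq_true_eq]
        omega
      have h2 : u[i.toNat]?.toList = [a] := by
        rw [List.getElem?_eq_getElem hi, ha]; rfl
      rw [h1, h2]
      simp
    have hdrop : (u.drop (i.toNat+1)).countP (fun x => decide (a ≤ x ∧ x ≤ a + 4))
        = (u.drop (i.toNat+1)).countP (fun x => decide (x - a ≤ 4)) := by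
      apply List.countP_congr
      intro y hy
      have := fact2 y hy
      simp only [decide_eq_true_eq]
      omega
    rw [htake, hdrop]
    push_cast
    ring
  rw [hcnt]
  by_cases h : 0 < (u.drop (i.toNat+1)).countP (fun x => decide (x - a ≤ 4))
  · rw [if_pos h, if_pos (by omega)]
    congr 1
    omega
  · rw [if_neg h, if_neg (by omega)]

-- Int fold over a list of casts equals the cast of the Nat fold
theorem pvCastFold (cN : Nat → Nat) (cI : Int → Int) (l : List Nat)
    (h : ∀ r ∈ l, cI (r : Int) = ((cN r : Nat) : Int)) : ∀ a : Nat,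
    (l.map (fun k : Nat => (k : Int))).foldl
        (fun sp r => if 2 ≤ cI r then max sp (cI r) else sp) (a : Int)
      = ((l.foldl (fun sp r => if 2 ≤ cN r then max sp (cN r) else sp) a : Nat) : Int) := by
  induction l with
  | nil => intro a; simp
  | cons x l ih =>
    intro a
    simp only [List.map_cons, List.foldl_cons]
    rw [h x (by simp)]
    by_cases h2 : 2 ≤ cN x
    · rw [if_pos (by exact_mod_cast h2), if_pos h2, ← Nat.cast_max]
      exact ih (fun r hr => h r (by simp [hr])) (max a (cN x))
    · rw [if_neg (by exact_mod_cast h2), if_neg h2]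
      exact ih (fun r hr => h r (by simp [hr])) a

-- fold-max helpers
theorem pvFoldMaxGe (f : Nat → Nat) (l : List Nat) : ∀ a : Nat,
    a ≤ l.foldl (fun acc x => max acc (f x)) a ∧
    ∀ x ∈ l, f x ≤ l.foldl (fun acc x => max acc (f x)) a := by
  induction l with
  | nil => intro a; simp
  | cons y l ih =>
    intro a
    simp only [List.foldl_cons]
    obtain ⟨h1, h2⟩ := ih (max a (f y))
    refine ⟨le_trans (le_max_left _ _) h1, ?_⟩
    intro x hx
    rcases List.mem_cons.mp hx with h | h
    · subst h; exact le_trans (le_max_right _ _) h1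
    · exact h2 x h

theorem pvFoldMaxLe (f : Nat → Nat) (B : Nat) (l : List Nat) : ∀ a : Nat, a ≤ B →
    (∀ x ∈ l, f x ≤ B) → l.foldl (fun acc x => max acc (f x)) a ≤ B := by
  induction l with
  | nil => intro a ha _; simpa using ha
  | cons y l ih =>
    intro a ha hb
    simp only [List.foldl_cons]
    exact ih (max a (f y)) (by have := hb y (by simp); omega)
      (fun x hx => hb x (by simp [hx]))

theorem pvFoldMaxMem (f : Nat → Nat) (l : List Nat) : ∀ a : Nat,
    l.foldl (fun acc x => max acc (f x)) a = a ∨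
    ∃ x ∈ l, l.foldl (fun acc x => max acc (f x)) a = f x := by
  induction l with
  | nil => intro a; left; rfl
  | cons y l ih =>
    intro a
    simp only [List.foldl_cons]
    rcases ih (max a (f y)) with h | ⟨x, hx, hfx⟩
    · rcases max_choice a (f y) with hm | hm
      · left; rw [h, hm]
      · right; exact ⟨y, by simp, by rw [h, hm]⟩
    · right; exact ⟨x, by simp [hx], hfx⟩

theorem pvThreshLe (f : Nat → Nat) (l : List Nat) : ∀ a b : Nat, a ≤ b →
    l.foldl (fun sp r => if 2 ≤ f r then max sp (f r) else sp) a
      ≤ l.foldl (fun acc x => max acc (f x)) b := by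
  induction l with
  | nil => intro a b h; simpa using h
  | cons y l ih =>
    intro a b h
    simp only [List.foldl_cons]
    by_cases h2 : 2 ≤ f y
    · rw [if_pos h2]; exact ih _ _ (by omega)
    · rw [if_neg h2]; exact ih _ _ (by omega)

theorem pvThreshInitLe (f : Nat → Nat) (l : List Nat) : ∀ a : Nat,
    a ≤ l.foldl (fun sp r => if 2 ≤ f r then max sp (f r) else sp) a := by
  induction l with
  | nil => intro a; simp
  | cons y l ih =>
    intro a
    simp only [List.foldl_cons]
    by_cases h2 : 2 ≤ f y
    · rw [if_pos h2]; exact le_trans (le_max_left _ _) (ih _)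
    · rw [if_neg h2]; exact ih a

theorem pvThreshGe (f : Nat → Nat) (l : List Nat) : ∀ a : Nat,
    ∀ x ∈ l, 2 ≤ f x → f x ≤ l.foldl (fun sp r => if 2 ≤ f r then max sp (f r) else sp) a := by
  induction l with
  | nil => intro a x hx; simp at hx
  | cons y l ih =>
    intro a x hx h2
    simp only [List.foldl_cons]
    rcases List.mem_cons.mp hx with h | h
    · subst h
      rw [if_pos h2]
      exact le_trans (le_max_right _ _) (pvThreshInitLe f l _)
    · by_cases hfy : 2 ≤ f y
      · rw [if_pos hfy]; exact ih _ x h h2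
      · rw [if_neg hfy]; exact ih _ x h h2

-- popcount of the low 5 bits as window machinery
def pvPc (m r : Nat) : Nat := PySem.Int.bitCount ((((m >>> r) &&& 31 : Nat) : Int))

theorem pvPopc5 : ∀ w : Nat, w < 32 →
    PySem.Int.bitCount ((w : Nat) : Int) = (List.range 5).countP w.testBit := by decide

theorem pvFoldPcZero (l : List Nat) : ∀ a : Nat,
    l.foldl (fun a r => max a (pvPc 0 r)) a = a := by
  induction l with
  | nil => intro a; rfl
  | cons x l ih =>
    intro a
    simp only [List.foldl_cons]
    have h0 : pvPc 0 x = 0 := by simp [pvPc, Nat.zero_shiftRight, Nat.zero_and]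
    rw [h0, Nat.max_zero]
    exact ih a

theorem pvSpLoopChar : ∀ (k m sp : Nat), m < 2 ^ k →
    pvSpLoopB m ((sp : Nat) : Int)
      = (((List.range k).foldl (fun a r => max a (pvPc m r)) sp : Nat) : Int) := by
  intro k
  induction k with
  | zero =>
    intro m sp h
    have hm : m = 0 := by simpa using h
    subst hm
    rw [pvSpLoopB]
    simp
  | succ k ih =>
    intro m sp h
    by_cases hm : m = 0
    · subst hm
      rw [pvSpLoopB]
      simp [pvFoldPcZero]
    · rw [pvSpLoopB, if_neg hm]
      have hpc0 : PySem.Int.bitCount (((m &&& 31 : Nat) : Int)) = pvPc m 0 := by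
        simp [pvPc, Nat.shiftRight_zero]
      have hcast : max ((sp : Nat) : Int) ((PySem.Int.bitCount (((m &&& 31 : Nat) : Int)) : Nat) : Int)
          = (((max sp (pvPc m 0) : Nat) : Nat) : Int) := by
        rw [Nat.cast_max, hpc0]
      rw [hcast]
      have hlt : m >>> 1 < 2 ^ k := by
        have h1 : m >>> 1 = m / 2 := Nat.shiftRight_one m
        have h2 : 2 ^ (k + 1) = 2 * 2 ^ k := by ring
        omega
      rw [ih (m >>> 1) (max sp (pvPc m 0)) hlt]
      congr 1
      rw [List.range_succ_eq_map, List.foldl_cons, List.foldl_map]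
      apply List.foldl_ext
      intro a r _
      have hshift : pvPc m (Nat.succ r) = pvPc (m >>> 1) r := by
        simp only [pvPc]
        rw [show Nat.succ r = 1 + r by omega, Nat.shiftRight_add]
      rw [hshift]

-- count of present ranks in the 5-wide window starting at r
def pvCntN (u : List Nat) (r : Nat) : Nat :=
  u.countP (fun x => decide (r ≤ x) && decide (x ≤ r + 4))

theorem pvWindowPopc (m : Nat) (hbits : ∀ k, m.testBit k = true → k < 13) (r : Nat) :
    pvPc m r = pvCntN ((List.range 13).filter m.testBit) r := by
  have h32 : (m >>> r) &&& 31 < 32 := lt_of_le_of_lt Nat.and_le_right (by norm_num)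
  rw [pvPc, pvPopc5 _ h32]
  have h31 : ∀ i, (31 : Nat).testBit i = decide (i < 5) := by
    intro i
    rw [show (31 : Nat) = 2 ^ 5 - 1 by norm_num, Nat.testBit_two_pow_sub_one]
  have hstep1 : (List.range 5).countP ((m >>> r) &&& 31).testBit
      = (List.range 5).countP (fun i => m.testBit (r + i)) := by
    apply List.countP_congr
    intro i hi
    have hi5 : i < 5 := List.mem_range.mp hi
    rw [Nat.testBit_and, Nat.testBit_shiftRight, h31 i]
    simp [hi5]
  rw [hstep1]
  have hstep2 : (List.range 5).countP (fun i => m.testBit (r + i))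
      = (List.range' r 5).countP m.testBit := by
    rw [List.range'_eq_map_range, List.countP_map]
    rfl
  rw [hstep2]
  unfold pvCntN
  rw [List.countP_filter, List.countP_eq_length_filter, List.countP_eq_length_filter]
  apply List.Perm.length_eq
  apply (List.perm_ext_iff_of_nodup (List.Nodup.filter _ List.nodup_range')
    (List.Nodup.filter _ List.nodup_range)).mpr
  intro x
  simp only [List.mem_filter, List.mem_range'_1, List.mem_range, Bool.and_eq_true,
    decide_eq_true_eq]
  constructor
  · rintro ⟨⟨h1, h2⟩, hbx⟩
    exact ⟨hbits x hbx, ⟨h1, by omega⟩, hbx⟩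
  · rintro ⟨h13, ⟨h1, h2⟩, hbx⟩
    exact ⟨⟨h1, by omega⟩, hbx⟩

-- the sliding step: any 5-window count is at most some anchored (present-rank) window count
theorem pvSlide (uN : List Nat) (hp : uN.Pairwise (· < ·)) (r : Nat) :
    pvCntN uN r ≤ uN.foldl (fun a x => max a (pvCntN uN x)) 0 := by
  by_cases hW : ∃ x ∈ uN, r ≤ x ∧ x ≤ r + 4
  · obtain ⟨x0, hx0u, hx0w⟩ := hW
    have hx0 : x0 ∈ uN.filter (fun x => decide (r ≤ x) && decide (x ≤ r + 4)) :=
      List.mem_filter.mpr ⟨hx0u, by simp [hx0w.1, hx0w.2]⟩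
    obtain ⟨mhd, tl, hwe⟩ : ∃ mhd tl,
        uN.filter (fun x => decide (r ≤ x) && decide (x ≤ r + 4)) = mhd :: tl := by
      cases hwc : uN.filter (fun x => decide (r ≤ x) && decide (x ≤ r + 4)) with
      | nil => rw [hwc] at hx0; simp at hx0
      | cons a b => exact ⟨a, b, rfl⟩
    have hmw : mhd ∈ uN.filter (fun x => decide (r ≤ x) && decide (x ≤ r + 4)) := by
      rw [hwe]; simp
    have hmu : mhd ∈ uN := (List.mem_filter.mp hmw).1
    have hmwin : r ≤ mhd ∧ mhd ≤ r + 4 := by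
      have := (List.mem_filter.mp hmw).2
      simpa using this
    have hmin : ∀ y ∈ uN.filter (fun x => decide (r ≤ x) && decide (x ≤ r + 4)), mhd ≤ y := by
      have hpw := hp.filter (fun x => decide (r ≤ x) && decide (x ≤ r + 4))
      rw [hwe] at hpw
      intro y hy
      rw [hwe] at hy
      rcases List.mem_cons.mp hy with h | h
      · exact le_of_eq h.symm
      · exact le_of_lt ((List.pairwise_cons.mp hpw).1 y h)
    have hmono : pvCntN uN r ≤ pvCntN uN mhd := by
      unfold pvCntN
      apply List.countP_mono_left
      intro x hxu hxr
      simp only [Bool.and_eq_true, decide_eq_true_eq] at hxr ⊢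
      have hxw : x ∈ uN.filter (fun x => decide (r ≤ x) && decide (x ≤ r + 4)) :=
        List.mem_filter.mpr ⟨hxu, by simp [hxr.1, hxr.2]⟩
      exact ⟨hmin x hxw, by omega⟩
    exact le_trans hmono ((pvFoldMaxGe (pvCntN uN) uN 0).2 mhd hmu)
  · have h0 : pvCntN uN r = 0 := by
      unfold pvCntN
      rw [List.countP_eq_zero]
      intro x hx
      simp only [Bool.and_eq_true, decide_eq_true_eq, not_and]
      intro h1 h2
      exact absurd ⟨x, hx, h1, h2⟩ hW
    rw [h0]
    omega

-- ===== VERDICT (by name: the statement is the Claim_ definition above) =====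
set_option maxHeartbeats 4000000 in
theorem get_board_bucket_spec : Claim_equal_get_board_bucket := by
  intro board _hdom hpre
  unfold Spec_get_board_bucket get_board_bucket get_board_bucket_alt
  by_cases hb : board = []
  · rw [if_pos hb, if_pos hb]
  rw [if_neg hb, if_neg hb]
  simp only []
  -- ---- A side: parse, ranks, suits ----
  have hcards : List.foldl (fun acc c => acc ++ [card_str_to_int c]) [] board
      = board.map pvParseCardB := by
    rw [PySem.List.foldl_append_singleton_eq_map card_str_to_int board []]
    simp only [List.nil_append]
    exact List.map_congr_left (fun c _ => pvParseEq c)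
  have hR : List.map (fun c => PySem.Int.floordiv c 4) (board.map pvParseCardB)
      = board.map pvRk := by
    rw [List.map_map]
    exact List.map_congr_left (fun c _ => pvFdivParse c)
  have hS : List.map (fun c => PySem.Int.mod c 4) (board.map pvParseCardB)
      = board.map pvSt := by
    rw [List.map_map]
    exact List.map_congr_left (fun c _ => pvModParse c)
  rw [hcards, hR, hS]
  -- ---- casts between the Int lists (A) and the Nat lists (B) ----
  have hRcast : board.map pvRk = (board.map pvRkN).map (fun k : Nat => (k : Int)) := by
    rw [List.map_map]
    exact List.map_congr_left (fun c _ => pvRkCast c)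
  have hScast : board.map pvSt = (board.map pvStN).map (fun k : Nat => (k : Int)) := by
    rw [List.map_map]
    exact List.map_congr_left (fun c _ => pvStCast c)
  have hcntR : ∀ k : Nat, (board.map pvRk).count (k : Int) = (board.map pvRkN).count k := by
    intro k
    rw [hRcast]
    exact List.count_map_of_injective _ _ (fun a b h => by exact_mod_cast h) k
  have hcntS : ∀ k : Nat, (board.map pvSt).count (k : Int) = (board.map pvStN).count k := by
    intro k
    rw [hScast]
    exact List.count_map_of_injective _ _ (fun a b h => by exact_mod_cast h) k
  have hRn13 : ∀ a ∈ board.map pvRkN, a < 13 := by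
    intro a ha
    obtain ⟨c, _, rfl⟩ := List.mem_map.mp ha
    exact pvRkNlt c
  have hSn4 : ∀ a ∈ board.map pvStN, a < 4 := by
    intro a ha
    obtain ⟨c, _, rfl⟩ := List.mem_map.mp ha
    exact pvStNlt c
  -- ---- A's rank count table ----
  have hR13 : ∀ x ∈ board.map pvRk, 0 ≤ x ∧ x < ((List.replicate 13 (0:Int)).length : Int) := by
    intro x hx
    obtain ⟨c, _, rfl⟩ := List.mem_map.mp hx
    have := pvRkBounds c
    simp only [List.length_replicate]
    omega
  have hcfR := pvCountFold (board.map pvRk) (List.replicate 13 0) hR13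
  set rcR := List.foldl (fun a r => PySem.List.pySetD a r (PySem.List.pyGetD a r 0 + 1))
      (List.replicate 13 (0:Int)) (List.map pvRk board) with hrcRdef
  have hlenrc : rcR.length = 13 := hcfR.1.trans (by norm_num)
  have hcountR : ∀ k : Nat, k < 13 →
      PySem.List.pyGetD rcR (k : Int) 0 = ((board.map pvRkN).count k : Int) := by
    intro k hk
    rw [PySem.List.pyGetD_eq_getElem rcR 0 (by omega) (by rw [hlenrc]; exact_mod_cast hk)]
    have hg := hcfR.2 k (by simp; omega)
    rw [List.getD_eq_getElem rcR 0 (by rw [hlenrc]; simpa using hk)] at hg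
    simp only [Int.toNat_natCast] at hg ⊢
    rw [hg, List.getD_replicate 0 (by omega)]
    rw [hcntR k]
    simp
  -- ---- A's suit count table ----
  have hS4 : ∀ x ∈ board.map pvSt, 0 ≤ x ∧ x < ((List.replicate 4 (0:Int)).length : Int) := by
    intro x hx
    obtain ⟨c, _, rfl⟩ := List.mem_map.mp hx
    have := pvStBounds c
    simp only [List.length_replicate]
    omega
  have hcfS := pvCountFold (board.map pvSt) (List.replicate 4 0) hS4
  set scS := List.foldl (fun a r => PySem.List.pySetD a r (PySem.List.pyGetD a r 0 + 1))
      (List.replicate 4 (0:Int)) (List.map pvSt board) with hscSdef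
  have hlensc : scS.length = 4 := hcfS.1.trans (by norm_num)
  have hcountS : ∀ k : Nat, k < 4 →
      PySem.List.pyGetD scS (k : Int) 0 = ((board.map pvStN).count k : Int) := by
    intro k hk
    rw [PySem.List.pyGetD_eq_getElem scS 0 (by omega) (by rw [hlensc]; exact_mod_cast hk)]
    have hg := hcfS.2 k (by simp; omega)
    rw [List.getD_eq_getElem scS 0 (by rw [hlensc]; simpa using hk)] at hg
    simp only [Int.toNat_natCast] at hg ⊢
    rw [hg, List.getD_replicate 0 (by omega)]
    rw [hcntS k]
    simp
  -- ---- B's fused fold ----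
  obtain ⟨hmaskbit, hpairedB, hs1bit, hs2bit, hs3bit⟩ := pvFoldBChar board
  have hmask13 : ∀ k, (board.foldl pvStepB (0,0,0,0,0)).1.testBit k = true → k < 13 := by
    intro k hk
    rw [hmaskbit] at hk
    have h1 : 1 ≤ (board.map pvRkN).count k := of_decide_eq_true hk
    exact hRn13 k (List.count_pos_iff.mp (by omega))
  have hmasklt := pvMaskLt _ hmask13
  -- ---- rc/sc element characterizations ----
  have hrc_elem : ∀ x ∈ rcR, ∃ k : Nat, k < 13 ∧ x = ((board.map pvRkN).count k : Int) := by
    intro x hx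
    obtain ⟨i, hi, hxe⟩ := List.getElem_of_mem hx
    refine ⟨i, by omega, ?_⟩
    rw [← hcountR i (by omega),
      PySem.List.pyGetD_eq_getElem rcR 0 (by omega) (by exact_mod_cast hi)]
    simp [hxe]
  have hrc_mem : ∀ k : Nat, k < 13 → (((board.map pvRkN).count k : Nat) : Int) ∈ rcR := by
    intro k hk
    rw [← hcountR k hk,
      PySem.List.pyGetD_eq_getElem rcR 0 (by omega) (by rw [hlenrc]; exact_mod_cast hk)]
    exact List.getElem_mem _
  have hsc_elem : ∀ x ∈ scS, ∃ k : Nat, k < 4 ∧ x = ((board.map pvStN).count k : Int) := by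
    intro x hx
    obtain ⟨i, hi, hxe⟩ := List.getElem_of_mem hx
    refine ⟨i, by omega, ?_⟩
    rw [← hcountS i (by omega),
      PySem.List.pyGetD_eq_getElem scS 0 (by omega) (by exact_mod_cast hi)]
    simp [hxe]
  have hsc_mem : ∀ k : Nat, k < 4 → (((board.map pvStN).count k : Nat) : Int) ∈ scS := by
    intro k hk
    rw [← hcountS k hk,
      PySem.List.pyGetD_eq_getElem scS 0 (by omega) (by rw [hlensc]; exact_mod_cast hk)]
    exact List.getElem_mem _
  -- ---- PAIRED ----
  have hrcne : rcR ≠ [] := by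
    intro h
    rw [h] at hlenrc
    simp at hlenrc
  obtain ⟨mR, hmR⟩ : ∃ m, PySem.List.max? rcR (fun x => x) = some m := by
    cases h : PySem.List.max? rcR (fun x => x) with
    | none => exact absurd ((PySem.List.max?_eq_none_iff rcR _).mp h) hrcne
    | some m => exact ⟨m, rfl⟩
  have hmR_mem := PySem.List.max?_mem hmR
  have hmR_max := PySem.List.max?_isMax hmR
  have hPiff : (2 ≤ mR) ↔ ¬ (board.map pvRkN).Nodup := by
    constructor
    · intro h2
      obtain ⟨k, hk13, hkeq⟩ := hrc_elem mR hmR_mem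
      rw [List.nodup_iff_count_le_one]
      push_neg
      refine ⟨k, ?_⟩
      rw [hkeq] at h2
      exact_mod_cast (by omega : (1 : Int) < ((board.map pvRkN).count k : Int))
    · intro hnd
      rw [List.nodup_iff_count_le_one] at hnd
      push_neg at hnd
      obtain ⟨a, ha⟩ := hnd
      have hamem : a ∈ board.map pvRkN := List.count_pos_iff.mp (by omega)
      have ha13 : a < 13 := hRn13 a hamem
      have hle : (((board.map pvRkN).count a : Nat) : Int) ≤ mR := hmR_max _ (hrc_mem a ha13)
      omega
  have hPP : (if 2 ≤ mR then (1:Int) else 0) = (board.foldl pvStepB (0,0,0,0,0)).2.1 := by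
    rw [hpairedB]
    by_cases h2 : 2 ≤ mR
    · rw [if_pos h2, if_neg (hPiff.mp h2)]
    · rw [if_neg h2, if_pos (not_not.mp (fun h => h2 (hPiff.mpr h)))]
  -- ---- FLUSH ----
  have hscne : scS ≠ [] := by
    intro h
    rw [h] at hlensc
    simp at hlensc
  obtain ⟨mS, hmS⟩ : ∃ m, PySem.List.max? scS (fun x => x) = some m := by
    cases h : PySem.List.max? scS (fun x => x) with
    | none => exact absurd ((PySem.List.max?_eq_none_iff scS _).mp h) hscne
    | some m => exact ⟨m, rfl⟩
  have hmS_mem := PySem.List.max?_mem hmS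
  have hmS_max := PySem.List.max?_isMax hmS
  have hsuit_iff : ∀ n : Nat, 1 ≤ n → ((n : Int) ≤ mS ↔ ∃ k : Nat, n ≤ (board.map pvStN).count k) := by
    intro n hn1
    constructor
    · intro hn
      obtain ⟨k, hk4, hkeq⟩ := hsc_elem mS hmS_mem
      refine ⟨k, ?_⟩
      rw [hkeq] at hn
      exact_mod_cast hn
    · rintro ⟨k, hk⟩
      by_cases hk4 : k < 4
      · have hle : (((board.map pvStN).count k : Nat) : Int) ≤ mS := hmS_max _ (hsc_mem k hk4)
        omega
      · exfalso
        have hmem : k ∈ board.map pvStN := List.count_pos_iff.mp (by omega)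
        have := hSn4 k hmem
        omega
  have hs3iff : (board.foldl pvStepB (0,0,0,0,0)).2.2.2.2 ≠ 0 ↔ (3 : Int) ≤ mS := by
    rw [show (3:Int) = ((3:Nat):Int) by norm_num, hsuit_iff 3 (by norm_num)]
    constructor
    · intro h
      obtain ⟨i, hi⟩ := pvNeZeroBit _ h
      rw [hs3bit] at hi
      exact ⟨i, of_decide_eq_true hi⟩
    · rintro ⟨k, hk⟩
      intro h0
      have := hs3bit k
      rw [h0, Nat.zero_testBit] at this
      rw [eq_comm, decide_eq_false_iff_not] at this
      exact this hk
  have hs2iff : (board.foldl pvStepB (0,0,0,0,0)).2.2.2.1 ≠ 0 ↔ (2 : Int) ≤ mS := by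
    rw [show (2:Int) = ((2:Nat):Int) by norm_num, hsuit_iff 2 (by norm_num)]
    constructor
    · intro h
      obtain ⟨i, hi⟩ := pvNeZeroBit _ h
      rw [hs2bit] at hi
      exact ⟨i, of_decide_eq_true hi⟩
    · rintro ⟨k, hk⟩
      intro h0
      have := hs2bit k
      rw [h0, Nat.zero_testBit] at this
      rw [eq_comm, decide_eq_false_iff_not] at this
      exact this hk
  have hmS1 : (1 : Int) ≤ mS := by
    rw [show (1:Int) = ((1:Nat):Int) by norm_num, hsuit_iff 1 (by norm_num)]
    obtain ⟨c, hc⟩ := List.exists_mem_of_ne_nil board hb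
    refine ⟨pvStN c, ?_⟩
    have : pvStN c ∈ board.map pvStN := List.mem_map_of_mem hc
    exact List.count_pos_iff.mpr this
  have hFF : min 2 (mS - 1)
      = (if (board.foldl pvStepB (0,0,0,0,0)).2.2.2.2 ≠ 0 then (2:Int)
         else if (board.foldl pvStepB (0,0,0,0,0)).2.2.2.1 ≠ 0 then 1 else 0) := by
    by_cases h3 : (board.foldl pvStepB (0,0,0,0,0)).2.2.2.2 ≠ 0
    · rw [if_pos h3]
      have := hs3iff.mp h3
      omega
    · rw [if_neg h3]
      have hn3 : ¬ (3:Int) ≤ mS := fun h => h3 (hs3iff.mpr h)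
      by_cases h2 : (board.foldl pvStepB (0,0,0,0,0)).2.2.2.1 ≠ 0
      · rw [if_pos h2]
        have := hs2iff.mp h2
        omega
      · rw [if_neg h2]
        have hn2 : ¬ (2:Int) ≤ mS := fun h => h2 (hs2iff.mpr h)
        omega
  -- ---- HIGH ----
  have hRne : board.map pvRk ≠ [] := by simpa using hb
  obtain ⟨mH, hmH⟩ : ∃ m, PySem.List.max? (board.map pvRk) (fun x => x) = some m := by
    cases h : PySem.List.max? (board.map pvRk) (fun x => x) with
    | none => exact absurd ((PySem.List.max?_eq_none_iff _ _).mp h) hRne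
    | some m => exact ⟨m, rfl⟩
  have hmH_mem := PySem.List.max?_mem hmH
  have hmH_max := PySem.List.max?_isMax hmH
  have hHiff : (board.foldl pvStepB (0,0,0,0,0)).1 >>> 10 ≠ 0 ↔ (10 : Int) ≤ mH := by
    rw [pvShiftNeZero]
    constructor
    · rintro ⟨i, h10, hbit⟩
      rw [hmaskbit] at hbit
      have hcnt1 : 1 ≤ (board.map pvRkN).count i := of_decide_eq_true hbit
      have him : i ∈ board.map pvRkN := List.count_pos_iff.mp (by omega)
      have hiR : ((i : Nat) : Int) ∈ board.map pvRk := by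
        rw [hRcast]
        exact List.mem_map_of_mem him
      have := hmH_max _ hiR
      simp only at this
      omega
    · intro h10
      have hmem := hmH_mem
      rw [hRcast] at hmem
      obtain ⟨v, hv, hveq⟩ := List.mem_map.mp hmem
      refine ⟨v, by omega, ?_⟩
      rw [hmaskbit]
      exact decide_eq_true (List.count_pos_iff.mpr hv)
  have hHH : (if 10 ≤ mH then (1:Int) else 0)
      = (if (board.foldl pvStepB (0,0,0,0,0)).1 >>> 10 ≠ 0 then (1:Int) else 0) := by
    by_cases h : 10 ≤ mH
    · rw [if_pos h, if_pos (hHiff.mpr h)]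
    · rw [if_neg h, if_neg (fun hh => h (hHiff.mp hh))]
  -- ---- STRAIGHT ----
  -- A's sorted unique ranks as a filter of 0..12
  have humem : ∀ r : Int, r ∈ (PySem.List.pyRange 0 13 1).filter
      (fun r => decide (0 < PySem.List.pyGetD rcR r 0)) ↔ r ∈ board.map pvRk := by
    intro r
    rw [List.mem_filter, PySem.List.mem_pyRange_one]
    constructor
    · rintro ⟨⟨h0r, h13⟩, hpos⟩
      have hkn : r = ((r.toNat : Nat) : Int) := by omega
      rw [hkn] at hpos ⊢
      rw [hcountR r.toNat (by omega)] at hpos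
      simp only [decide_eq_true_eq] at hpos
      have hc : 0 < (board.map pvRk).count ((r.toNat : Nat) : Int) := by
        rw [hcntR]
        exact_mod_cast hpos
      exact List.count_pos_iff.mp hc
    · intro hrR
      have hbnd : 0 ≤ r ∧ r < 13 := by
        obtain ⟨c, _, rfl⟩ := List.mem_map.mp hrR
        have h1 := pvRkBounds c
        omega
      refine ⟨⟨hbnd.1, hbnd.2⟩, ?_⟩
      have hkn : r = ((r.toNat : Nat) : Int) := by omega
      rw [hkn, hcountR r.toNat (by omega)]
      simp only [decide_eq_true_eq]
      have hc : 0 < (board.map pvRk).count ((r.toNat : Nat) : Int) := by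
        rw [← hkn]
        exact List.count_pos_iff.mpr hrR
      rw [hcntR r.toNat] at hc
      exact_mod_cast hc
  have hsorted : PySem.List.sorted (PySem.Set.ofList (List.map pvRk board)) (fun x => x)
      = (PySem.List.pyRange 0 13 1).filter (fun r => decide (0 < PySem.List.pyGetD rcR r 0)) := by
    apply PySem.List.sorted_eq_of_perm_of_pairwise_lt
    · rw [List.perm_ext_iff_of_nodup (List.Nodup.filter _ (PySem.List.nodup_pyRange_one 0 13))
        (PySem.Set.nodup_ofList _)]
      intro r
      rw [humem r, PySem.Set.mem_ofList]
    · exact List.Pairwise.filter _ (PySem.List.pairwise_lt_pyRange_one 0 13)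
  rw [hsorted]
  -- the filter equals the cast of B's bit-filter
  have hucast : (PySem.List.pyRange 0 13 1).filter (fun r => decide (0 < PySem.List.pyGetD rcR r 0))
      = ((List.range 13).filter (board.foldl pvStepB (0,0,0,0,0)).1.testBit).map
          (fun k : Nat => (k : Int)) := by
    have hpyr : PySem.List.pyRange 0 13 1 = (List.range 13).map (fun k : Nat => (k : Int)) := by
      rw [PySem.List.pyRange_one]
      simp
    rw [hpyr, List.filter_map]
    congr 1
    apply List.filter_congr
    intro k hk
    have hk13 : k < 13 := List.mem_range.mp hk
    show decide (0 < PySem.List.pyGetD rcR ((k : Nat) : Int) 0)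
        = (board.foldl pvStepB (0,0,0,0,0)).1.testBit k
    rw [hcountR k hk13, hmaskbit k]
    exact decide_eq_decide.mpr (by omega)
  rw [hucast]
  set uN := (List.range 13).filter (board.foldl pvStepB (0,0,0,0,0)).1.testBit with huNdef
  set u : List Int := uN.map (fun k : Nat => (k : Int)) with hudef
  -- A's pair scan = anchored threshold fold over u
  have hup : u.Pairwise (· < ·) := by
    rw [hudef]
    refine List.Pairwise.map _ (fun a b h => by exact_mod_cast h) ?_
    exact List.Pairwise.filter _ List.pairwise_lt_range
  have hA : List.foldl
      (fun sp i => List.foldl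
        (fun sp j => if PySem.List.pyGetD u j 0 - PySem.List.pyGetD u i 0 ≤ 4
          then max sp (j - i + 1) else sp) sp
        (PySem.List.pyRange (i + 1) (PySem.List.len u) 1)) 0
      (PySem.List.pyRange 0 (PySem.List.len u) 1)
      = u.foldl (fun sp r => if 2 ≤ pvCnt u r then max sp (pvCnt u r) else sp) 0 := by
    rw [PySem.List.foldl_congr_mem _ _
      (fun sp i => if 2 ≤ pvCnt u (PySem.List.pyGetD u i 0)
        then max sp (pvCnt u (PySem.List.pyGetD u i 0)) else sp) 0
      (by
        intro acc i hi
        rw [PySem.List.mem_pyRange_one] at hi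
        have hlen : i < (u.length : Int) := by
          have := hi.2
          simpa [PySem.List.len_eq] using this
        exact pvInner u hup i hi.1 (by omega) acc)]
    exact PySem.List.foldl_pyRange_zero_pyGetD u 0
      (fun sp r => if 2 ≤ pvCnt u r then max sp (pvCnt u r) else sp) 0
  rw [hA]
  -- cast A's fold down to Nat
  have hcntcast : ∀ r ∈ uN, pvCnt u ((r : Nat) : Int) = ((pvCntN uN r : Nat) : Int) := by
    intro r _
    rw [pvCntEq, hudef, List.countP_map]
    unfold pvCntN
    congr 1
    apply List.countP_congr
    intro x _
    simp only [Function.comp_apply, Bool.and_eq_true, decide_eq_true_eq]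
    omega
  have hAfold : u.foldl (fun sp r => if 2 ≤ pvCnt u r then max sp (pvCnt u r) else sp) (0 : Int)
      = ((uN.foldl (fun sp r => if 2 ≤ pvCntN uN r then max sp (pvCntN uN r) else sp) 0 : Nat) : Int) := by
    rw [hudef]
    exact_mod_cast pvCastFold (pvCntN uN) (pvCnt u) uN (by rw [hudef] at hcntcast; exact hcntcast) 0
  rw [hAfold]
  -- B's while loop = window max over 0..12
  have hBloop : pvSpLoopB (board.foldl pvStepB (0,0,0,0,0)).1 (0 : Int)
      = (((List.range 13).foldl (fun a r => max a (pvCntN uN r)) 0 : Nat) : Int) := by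
    have h := pvSpLoopChar 13 (board.foldl pvStepB (0,0,0,0,0)).1 0 hmasklt
    simp only [Nat.cast_zero] at h
    rw [h]
    have hfold : (List.range 13).foldl
          (fun a r => max a (pvPc (board.foldl pvStepB (0,0,0,0,0)).1 r)) 0
        = (List.range 13).foldl (fun a r => max a (pvCntN uN r)) 0 := by
      apply List.foldl_ext
      intro a r _
      rw [pvWindowPopc _ hmask13 r, huNdef]
    rw [hfold]
  rw [hBloop]
  -- sliding-window equivalence of the two straight measures
  have hpairN : uN.Pairwise (· < ·) := List.Pairwise.filter _ List.pairwise_lt_range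
  have hgeMA := pvFoldMaxGe (pvCntN uN) uN 0
  have hgeMB := pvFoldMaxGe (pvCntN uN) (List.range 13) 0
  have hMAle : uN.foldl (fun a x => max a (pvCntN uN x)) 0
      ≤ (List.range 13).foldl (fun a x => max a (pvCntN uN x)) 0 := by
    apply pvFoldMaxLe _ _ _ _ hgeMB.1
    intro x hx
    exact hgeMB.2 x (List.mem_of_mem_filter (huNdef ▸ hx))
  have hMBle : (List.range 13).foldl (fun a x => max a (pvCntN uN x)) 0
      ≤ uN.foldl (fun a x => max a (pvCntN uN x)) 0 := by
    apply pvFoldMaxLe _ _ _ _ hgeMA.1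
    intro r _
    exact pvSlide uN hpairN r
  have hgle : uN.foldl (fun sp r => if 2 ≤ pvCntN uN r then max sp (pvCntN uN r) else sp) 0
      ≤ uN.foldl (fun a x => max a (pvCntN uN x)) 0 := pvThreshLe _ _ 0 0 le_rfl
  have hma2 : 2 ≤ uN.foldl (fun a x => max a (pvCntN uN x)) 0 →
      uN.foldl (fun a x => max a (pvCntN uN x)) 0
        ≤ uN.foldl (fun sp r => if 2 ≤ pvCntN uN r then max sp (pvCntN uN r) else sp) 0 := by
    intro h2
    rcases pvFoldMaxMem (pvCntN uN) uN 0 with h | ⟨x, hx, hfx⟩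
    · omega
    · rw [hfx] at h2 ⊢
      exact pvThreshGe _ _ 0 x hx h2
  have hSS : min 2 (max 0
        (((uN.foldl (fun sp r => if 2 ≤ pvCntN uN r then max sp (pvCntN uN r) else sp) 0 : Nat) : Int) - 2))
      = min 2 (max 0
        ((((List.range 13).foldl (fun a r => max a (pvCntN uN r)) 0 : Nat) : Int) - 2)) := by
    by_cases h2 : 2 ≤ uN.foldl (fun a x => max a (pvCntN uN x)) 0
    · have := hma2 h2
      omega
    · omega
  -- ---- assemble ----
  rw [hmR, hmS, hmH]
  simp only [Option.getD_some]
  simp only [hFF, hSS, ← hPP, ← hHH]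
  rfl
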